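-- pv_equiv track=rewrite | github.com/jhmalpern/AdventOfCode | Puzzles/Day5/Day5Solution.py | Check_doublet
-- ===== SOURCE A (Python) =====
-- def Check_doublet(string):
--     doublet = []
--     for each in range(len(string)):
--         try:
--             doublet.append(string[each] + string[each + 1])
--         except:
--             repeats = [doublet[dub] for dub in range(len(doublet)) if doublet[dub] in doublet[dub + 2:len(doublet)]]
--     return(repeats)
-- ===== SOURCE B (Python) =====
-- def Check_doublet(string):
--     pairs = [string[i:i + 2] for i in range(len(string) - 1)]
--     out = []
--     seen = set()
--     prev = None
--     for p in reversed(pairs):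
--         if p in seen:
--             out.append(p)
--         if prev is not None:
--             seen.add(prev)
--         prev = p
--     out.reverse()
--     return out
-- ===== Notes on version B (the rewrite author's own statement) =====
-- stated objective: faster
-- what changed: A checks, for every adjacent pair, membership in a quadratic slice of the remaining pair list; B makes one backward pass over the pair list maintaining a set of pairs seen at least two positions to the right.
import Mathlib
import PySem

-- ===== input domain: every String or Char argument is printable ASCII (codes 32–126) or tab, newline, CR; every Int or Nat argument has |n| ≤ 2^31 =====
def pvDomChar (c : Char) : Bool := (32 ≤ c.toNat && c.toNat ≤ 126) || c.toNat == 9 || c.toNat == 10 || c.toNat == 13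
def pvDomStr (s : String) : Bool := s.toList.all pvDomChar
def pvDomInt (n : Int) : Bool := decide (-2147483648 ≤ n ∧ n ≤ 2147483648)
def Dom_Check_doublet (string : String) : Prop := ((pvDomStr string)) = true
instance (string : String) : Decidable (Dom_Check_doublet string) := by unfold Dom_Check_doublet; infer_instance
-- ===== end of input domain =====

-- B replaces A's quadratic "membership in the rest of the list" scans by one backward pass over the
-- adjacent-pair list maintaining a set of pairs already seen at least two positions to the right.

-- ===== PORT A =====
-- the list comprehension A runs in the except-branch
def pvComp (D : List String) : List String :=
  (PySem.List.pyRange 0 D.length 1).foldl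
    (fun acc dub =>
      if (PySem.List.slice D (some (dub + 2)) (some (D.length : Int))).contains
           (PySem.List.pyGetD D dub "") then
        acc ++ [PySem.List.pyGetD D dub ""]
      else acc) []

-- loop body: 'string[each] + string[each+1]' concatenates two 1-char strings (String.ofList [c1, c2]);
-- the bare 'except' fires exactly when string[each + 1] is an IndexError
def pvStepA (cs : List Char) (st : List String × Option (List String)) (each : Int) :
    List String × Option (List String) :=
  match PySem.List.pyGet? cs each, PySem.List.pyGet? cs (each + 1) with
  | some c1, some c2 => (st.1 ++ [String.ofList [c1, c2]], st.2)
  | _, _ => (st.1, some (pvComp st.1))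

def Check_doublet (string : String) : List String :=
  let cs := string.toList
  (((PySem.List.pyRange 0 cs.length 1).foldl (pvStepA cs) ([], none)).2).getD []

-- ===== PORT B =====
def pvStepB (st : PySem.Set String × List String × Option String) (p : String) :
    PySem.Set String × List String × Option String :=
  let out := if st.1.contains p then st.2.1 ++ [p] else st.2.1
  let seen := match st.2.2 with
    | some prev => PySem.Set.add st.1 prev
    | none => st.1
  (seen, out, some p)

def Check_doublet_alt (string : String) : List String :=
  let cs := string.toList
  let pairs := (PySem.List.pyRange 0 ((cs.length : Int) - 1) 1).map
      (fun i => String.ofList (PySem.List.slice cs (some i) (some (i + 2))))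
  let st := pairs.reverse.foldl pvStepB (PySem.Set.empty, [], none)
  st.2.1.reverse

-- ===== PRECONDITION & SPEC =====
-- Pre_ excludes only the empty string, on which A raises UnboundLocalError
-- (the loop body never runs, so the name A returns was never assigned); B returns [] there.
def Pre_Check_doublet (string : String) : Prop := string ≠ ""
instance (string : String) : Decidable (Pre_Check_doublet string) := by
  unfold Pre_Check_doublet; infer_instance
def pvWitness_Check_doublet : String := "abab"

def Spec_Check_doublet (string : String) (out : List String) : Prop := out = Check_doublet_alt string
instance (string : String) (out : List String) : Decidable (Spec_Check_doublet string out) := by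
  unfold Spec_Check_doublet; infer_instance

-- ===== CLAIM (what is proved, stated in full; the proofs are below) =====
def Claim_equal_Check_doublet : Prop := ∀ (string : String), Dom_Check_doublet string →
  Pre_Check_doublet string → Spec_Check_doublet string (Check_doublet string)

-- ===== LEMMAS AND PROOFS =====

-- the common specification: a pair is kept iff it occurs again ≥ 2 positions later in the pair list
def pvSpec : List String → List String
  | [] => []
  | x :: rest => (if rest.tail.contains x then [x] else []) ++ pvSpec rest

def pvPairs (cs : List Char) : List String :=
  (List.range (cs.length - 1)).map (fun i => String.ofList [cs.getD i ' ', cs.getD (i + 1) ' '])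

lemma pvRange_natCast (m : Nat) :
    PySem.List.pyRange 0 (m : Int) 1 = (List.range m).map (fun k : Nat => (k : Int)) := by
  rw [PySem.List.pyRange_one]; simp

lemma pvStepA_in_range (cs : List Char) (st : List String × Option (List String)) (i : Nat)
    (h : i + 1 < cs.length) :
    pvStepA cs st (i : Int) = (st.1 ++ [String.ofList [cs.getD i ' ', cs.getD (i + 1) ' ']], st.2) := by
  have h1 : PySem.List.pyGet? cs (i : Int) = some (cs.getD i ' ') := by
    rw [PySem.List.pyGet?_natCast, List.getElem?_eq_getElem (by omega), List.getD_eq_getElem cs ' ' (by omega)]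
  have h2 : PySem.List.pyGet? cs ((i : Int) + 1) = some (cs.getD (i+1) ' ') := by
    have : (i : Int) + 1 = ((i + 1 : Nat) : Int) := by push_cast; ring
    rw [this, PySem.List.pyGet?_natCast, List.getElem?_eq_getElem (by omega), List.getD_eq_getElem cs ' ' (by omega)]
  simp [pvStepA, h1, h2]

lemma pvA_fold (cs : List Char) (m : Nat) (hm : m < cs.length) (acc : List String)
    (r : Option (List String)) :
    (PySem.List.pyRange 0 (m : Int) 1).foldl (pvStepA cs) (acc, r) =
      (acc ++ (List.range m).map (fun i => String.ofList [cs.getD i ' ', cs.getD (i + 1) ' ']), r) := by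
  induction m generalizing acc with
  | zero => simp [PySem.List.pyRange_one_eq_nil]
  | succ m ih =>
    have hc : ((m + 1 : Nat) : Int) = (m : Int) + 1 := by push_cast; ring
    rw [hc, PySem.List.pyRange_one_succ_right (by positivity), List.foldl_append,
        ih (by omega), List.range_succ]
    simp [pvStepA_in_range cs _ m (by omega)]

lemma pvA_eq (string : String) (h : string.toList ≠ []) :
    Check_doublet string = pvComp (pvPairs string.toList) := by
  set cs := string.toList with hcs
  have hn : 1 ≤ cs.length := List.length_pos_of_ne_nil (by rw [hcs]; exact h)
  have hc : ((cs.length : Nat) : Int) = ((cs.length - 1 : Nat) : Int) + 1 := by omega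
  have hget1 : PySem.List.pyGet? cs ((cs.length - 1 : Nat) : Int) = some (cs.getD (cs.length - 1) ' ') := by
    rw [PySem.List.pyGet?_natCast, List.getElem?_eq_getElem (by omega), List.getD_eq_getElem cs ' ' (by omega)]
  have hget2 : PySem.List.pyGet? cs (((cs.length - 1 : Nat) : Int) + 1) = none := by
    have : ((cs.length - 1 : Nat) : Int) + 1 = ((cs.length : Nat) : Int) := by omega
    rw [this, PySem.List.pyGet?_natCast]
    simp
  show (((PySem.List.pyRange 0 cs.length 1).foldl (pvStepA cs) ([], none)).2).getD [] = _
  rw [hc, PySem.List.pyRange_one_succ_right (by positivity), List.foldl_append,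
      pvA_fold cs (cs.length - 1) (by omega) [] none]
  simp only [List.foldl_cons, List.foldl_nil, pvStepA, hget1, hget2]
  rfl

lemma pvComp_filter (D : List String) :
    pvComp D = ((List.range D.length).filter
        (fun k => (D.drop (k + 2)).contains (D.getD k ""))).map (fun k => D.getD k "") := by
  unfold pvComp
  rw [show ((D.length : Nat) : Int) = ((D.length : Nat) : Int) from rfl, pvRange_natCast, List.foldl_map]
  have hcong : ∀ (acc : List String) (k : Nat), k ∈ List.range D.length →
      (if (PySem.List.slice D (some ((k : Int) + 2)) (some (D.length : Int))).contains
           (PySem.List.pyGetD D (k : Int) "") then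
        acc ++ [PySem.List.pyGetD D (k : Int) ""]
      else acc) =
      (if (D.drop (k + 2)).contains (D.getD k "") then acc ++ [D.getD k ""] else acc) := by
    intro acc k hk
    have h1 : ((k : Int) + 2) = ((k + 2 : Nat) : Int) := by push_cast; ring
    have h2 : PySem.List.slice D (some ((k + 2 : Nat) : Int)) (some (D.length : Int)) = D.drop (k + 2) := by
      rw [PySem.List.slice_natCast]
      exact List.take_of_length_le (by simp)
    rw [h1, h2]
    simp
  refine (PySem.List.foldl_congr_mem _ _ (fun acc k =>
        if (D.drop (k + 2)).contains (D.getD k "") then acc ++ [D.getD k ""] else acc) _ hcong).trans ?_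
  rw [PySem.List.foldl_append_if (p := fun k => (D.drop (k + 2)).contains (D.getD k ""))
        (f := fun k => D.getD k "")]
  simp

lemma pvFilter_spec (D : List String) :
    ((List.range D.length).filter
        (fun k => (D.drop (k + 2)).contains (D.getD k ""))).map (fun k => D.getD k "") =
      pvSpec D := by
  induction D with
  | nil => simp [pvSpec]
  | cons x rest ih =>
    rw [List.length_cons, List.range_succ_eq_map]
    simp only [List.filter_cons, List.filter_map]
    have hc : ((List.drop (0 + 2) (x :: rest)).contains ((x :: rest).getD 0 "")) = rest.tail.contains x := by
      simp [← List.drop_one]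
    have htail : List.map (fun k => (x :: rest).getD k "")
        (List.map Nat.succ (List.filter
          ((fun k => (List.drop (k + 2) (x :: rest)).contains ((x :: rest).getD k "")) ∘ Nat.succ)
          (List.range rest.length))) = pvSpec rest := by
      have hP : ((fun k => (List.drop (k + 2) (x :: rest)).contains ((x :: rest).getD k "")) ∘ Nat.succ) =
          (fun k => (List.drop (k + 2) rest).contains (rest.getD k "")) := by
        funext k
        show (List.drop (k + 1 + 2) (x :: rest)).contains ((x :: rest).getD (k + 1) "") = _
        rw [Nat.add_right_comm k 1 2, List.drop_succ_cons, List.getD_cons_succ]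
      have hF : ((fun k => (x :: rest).getD k "") ∘ Nat.succ) = (fun k => rest.getD k "") := by
        funext k
        show (x :: rest).getD (k + 1) "" = _
        rw [List.getD_cons_succ]
      rw [List.map_map, hP, hF, ih]
    rw [hc, pvSpec]
    by_cases h : (rest.tail.contains x : Bool)
    · simp only [h, if_pos, List.map_cons, List.getD_cons_zero]
      rw [htail]
      simp
    · simp only [h]
      rw [if_neg (by simp), if_neg (by simp), htail]
      simp

lemma pvB_fold (P : List String) :
    (∀ x, x ∈ (P.foldr (fun p st => pvStepB st p) (PySem.Set.empty, [], none)).1 ↔ x ∈ P.tail) ∧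
      (P.foldr (fun p st => pvStepB st p) (PySem.Set.empty, [], none)).2.1 = (pvSpec P).reverse ∧
      (P.foldr (fun p st => pvStepB st p) (PySem.Set.empty, [], none)).2.2 = P.head? := by
  induction P with
  | nil => simp [PySem.Set.empty, pvSpec]
  | cons p rest ih =>
    obtain ⟨ihs, iho, ihp⟩ := ih
    rw [List.foldr_cons]
    refine ⟨?_, ?_, rfl⟩
    · intro x
      show x ∈ (match (rest.foldr (fun p st => pvStepB st p) (PySem.Set.empty, [], none)).2.2 with
        | some prev => PySem.Set.add (rest.foldr (fun p st => pvStepB st p) (PySem.Set.empty, [], none)).1 prev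
        | none => (rest.foldr (fun p st => pvStepB st p) (PySem.Set.empty, [], none)).1) ↔ x ∈ (p :: rest).tail
      rw [ihp]
      rcases rest with _ | ⟨h, t⟩
      · simp
      · simp only [List.head?_cons, List.tail_cons]
        rw [PySem.Set.mem_add, ihs x]
        simp only [List.tail_cons, List.mem_cons]
        tauto
    · have hcont : (rest.foldr (fun p st => pvStepB st p) (PySem.Set.empty, [], none)).1.contains p = rest.tail.contains p := by
        rcases Bool.eq_false_or_eq_true ((rest.foldr (fun p st => pvStepB st p) (PySem.Set.empty, [], none)).1.contains p) with hb | hb <;>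
          rcases Bool.eq_false_or_eq_true (rest.tail.contains p) with hb2 | hb2 <;>
            simp_all
      show (if (rest.foldr (fun p st => pvStepB st p) (PySem.Set.empty, [], none)).1.contains p
            then (rest.foldr (fun p st => pvStepB st p) (PySem.Set.empty, [], none)).2.1 ++ [p]
            else (rest.foldr (fun p st => pvStepB st p) (PySem.Set.empty, [], none)).2.1) = (pvSpec (p :: rest)).reverse
      rw [hcont, iho, pvSpec]
      by_cases hb : p ∈ rest.tail <;> simp [hb]

lemma pvPairsB_eq (cs : List Char) (h : 1 ≤ cs.length) :
    (PySem.List.pyRange 0 ((cs.length : Int) - 1) 1).map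
      (fun i => String.ofList (PySem.List.slice cs (some i) (some (i + 2)))) = pvPairs cs := by
  have hc : ((cs.length : Int) - 1) = ((cs.length - 1 : Nat) : Int) := by omega
  rw [hc, pvRange_natCast, List.map_map]
  unfold pvPairs
  refine List.map_congr_left (fun i hi => ?_)
  have hi' : i < cs.length - 1 := List.mem_range.mp hi
  have h2 : ((i : Int) + 2) = ((i + 2 : Nat) : Int) := by push_cast; ring
  show String.ofList (PySem.List.slice cs (some (i : Int)) (some ((i : Int) + 2))) = _
  rw [h2, PySem.List.slice_natCast]
  congr 1
  have h3 : i + 2 - i = 2 := by omega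
  rw [h3, List.drop_eq_getElem_cons (by omega : i < cs.length),
      List.drop_eq_getElem_cons (by omega : i + 1 < cs.length),
      List.getD_eq_getElem cs ' ' (by omega : i < cs.length),
      List.getD_eq_getElem cs ' ' (by omega : i + 1 < cs.length)]
  rfl

lemma pvB_eq (string : String) (h : string.toList ≠ []) :
    Check_doublet_alt string = pvSpec (pvPairs string.toList) := by
  have hn : 1 ≤ string.toList.length := List.length_pos_of_ne_nil h
  show ((((PySem.List.pyRange 0 ((string.toList.length : Int) - 1) 1).map
      (fun i => String.ofList (PySem.List.slice string.toList (some i) (some (i + 2))))).reverse.foldl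
        pvStepB (PySem.Set.empty, [], none)).2.1).reverse = _
  rw [pvPairsB_eq _ hn, List.foldl_reverse]
  rw [(pvB_fold (pvPairs string.toList)).2.1]
  exact List.reverse_reverse _

-- ===== VERDICT (by name: the statement is the Claim_ definition above) =====
theorem Check_doublet_spec : Claim_equal_Check_doublet := by
  intro s _ hpre
  have h : s.toList ≠ [] := by
    intro hnil
    exact hpre (by simpa [String.toList_eq_nil_iff] using hnil)
  show Check_doublet s = Check_doublet_alt s
  rw [pvA_eq s h, pvB_eq s h, pvComp_filter, pvFilter_spec]
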